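-- pv_equiv track=rewrite | github.com/danielcherubini/elegoo-homeassistant | custom_components/elegoo_printer/websocket/server.py | extract_mainboard_id_from_topic
-- ===== SOURCE A (Python) =====
-- MIN_MAINBOARD_ID_LENGTH = 8
--
-- TOPIC_PARTS_COUNT = 3  # Expected parts in SDCP topic: sdcp/{type}/{MainboardID}
--
-- def extract_mainboard_id_from_topic(topic: str) -> str | None:
--     """
--     Extract MainboardID from SDCP topic string.
--
--     Topics follow the pattern: "sdcp/{message_type}/{MainboardID}"
--     Examples:
--     - "sdcp/request/ABC123DEF456" -> "ABC123DEF456"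
--     - "sdcp/status/abc123def456" -> "abc123def456"
--     - "sdcp/attributes/12345678" -> "12345678"
--
--     Args:
--         topic: The SDCP topic string
--
--     Returns:
--         MainboardID if found and valid, None otherwise
--
--     """
--     if not topic or not isinstance(topic, str):
--         return None
--
--     parts = topic.strip().split("/")
--     if len(parts) != TOPIC_PARTS_COUNT or parts[0] != "sdcp":
--         return None
--
--     mainboard_id = parts[2]
--
--     # Validate MainboardID (hex characters, minimum length)
--     if len(mainboard_id) >= MIN_MAINBOARD_ID_LENGTH and all(
--         c in "0123456789abcdefABCDEF" for c in mainboard_id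
--     ):
--         return mainboard_id
--
--     return None
-- ===== SOURCE B (Python) =====
-- MIN_MAINBOARD_ID_LENGTH = 8
--
--
-- def extract_mainboard_id_from_topic(topic: str) -> str | None:
--     """Single-pass state machine: count slashes while collecting the first and
--     last segments; no split(), no intermediate parts list."""
--     if not topic or not isinstance(topic, str):
--         return None
--
--     slashes = 0
--     first = []
--     last = []
--     for c in topic.strip():
--         if c == "/":
--             slashes += 1
--             last = []
--         elif slashes == 0:
--             first.append(c)
--         else:
--             last.append(c)
--
--     if slashes != 2 or "".join(first) != "sdcp":
--         return None
--
--     mainboard_id = "".join(last)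
--     if len(mainboard_id) >= MIN_MAINBOARD_ID_LENGTH and all(
--         c in "0123456789abcdefABCDEF" for c in mainboard_id
--     ):
--         return mainboard_id
--     return None
-- ===== Notes on version B (the rewrite author's own statement) =====
-- stated objective: alternative
-- what changed: Replaces the strip/split/parts-indexing pipeline with a single-pass state machine over the stripped string that counts separator characters while collecting the first and last segments.
import Mathlib
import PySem

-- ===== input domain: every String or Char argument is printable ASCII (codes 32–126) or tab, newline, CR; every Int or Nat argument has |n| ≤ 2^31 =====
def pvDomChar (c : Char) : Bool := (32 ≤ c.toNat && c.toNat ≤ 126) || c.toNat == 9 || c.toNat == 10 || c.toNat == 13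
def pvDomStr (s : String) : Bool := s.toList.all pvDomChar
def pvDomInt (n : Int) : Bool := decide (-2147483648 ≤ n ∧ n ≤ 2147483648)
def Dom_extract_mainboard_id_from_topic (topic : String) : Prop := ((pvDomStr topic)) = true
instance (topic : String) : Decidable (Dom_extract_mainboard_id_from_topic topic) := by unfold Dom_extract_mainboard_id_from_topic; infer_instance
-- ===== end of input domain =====

-- B replaces strip/split/index by a single-pass slash-counting state machine (objective: alternative, same cost).

-- ===== PORT A =====
-- MIN_MAINBOARD_ID_LENGTH = 8, TOPIC_PARTS_COUNT = 3 are inlined as the literals 8 and 3.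
def extract_mainboard_id_from_topic (topic : String) : Option String :=
  if topic = "" then none  -- `not topic`
  else
    match PySem.Str.split? (PySem.Str.strip topic) "/" with
    | none => none  -- unreachable: separator "/" is non-empty
    | some parts =>
      if parts.length ≠ 3 ∨ PySem.List.pyGetD parts 0 "" ≠ "sdcp" then none
      else
        let mainboard_id := PySem.List.pyGetD parts 2 ""
        if 8 ≤ PySem.Str.len mainboard_id ∧
            mainboard_id.toList.all (fun c => PySem.Chars.isIn [c] "0123456789abcdefABCDEF".toList) then
          some mainboard_id
        else none

-- ===== PORT B =====
-- loop body: slashes += 1 / first.append(c) / last.append(c); state = (slashes, first, last)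
def pvAltStep (st : Int × List Char × List Char) (c : Char) : Int × List Char × List Char :=
  if c = '/' then (st.1 + 1, st.2.1, [])
  else if st.1 = 0 then (st.1, st.2.1 ++ [c], st.2.2)
  else (st.1, st.2.1, st.2.2 ++ [c])

def extract_mainboard_id_from_topic_alt (topic : String) : Option String :=
  if topic = "" then none
  else
    let st := (PySem.Str.strip topic).toList.foldl pvAltStep (0, [], [])
    if st.1 ≠ 2 ∨ String.ofList st.2.1 ≠ "sdcp" then none
    else
      let mainboard_id := String.ofList st.2.2
      if 8 ≤ PySem.Str.len mainboard_id ∧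
          mainboard_id.toList.all (fun c => PySem.Chars.isIn [c] "0123456789abcdefABCDEF".toList) then
        some mainboard_id
      else none

-- ===== PRECONDITION & SPEC =====
def Spec_extract_mainboard_id_from_topic (topic : String) (out : Option String) : Prop := out = extract_mainboard_id_from_topic_alt topic
instance (topic : String) (out : Option String) : Decidable (Spec_extract_mainboard_id_from_topic topic out) := by unfold Spec_extract_mainboard_id_from_topic; infer_instance

-- ===== CLAIM (what is proved, stated in full; the proofs are below) =====
def Claim_equal_extract_mainboard_id_from_topic : Prop := ∀ (topic : String), Dom_extract_mainboard_id_from_topic topic → Spec_extract_mainboard_id_from_topic topic (extract_mainboard_id_from_topic topic)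

-- ===== LEMMAS AND PROOFS =====

-- `split1 cs` = cs.split("/") (single-character separator), direct structural recursion
def pvSplit1 : List Char → List (List Char)
  | [] => [[]]
  | c :: r =>
    if c = '/' then [] :: pvSplit1 r
    else
      match pvSplit1 r with
      | [] => [[c]]
      | p :: ps => (c :: p) :: ps

theorem pvSplit1_ne_nil (cs : List Char) : pvSplit1 cs ≠ [] := by
  cases cs with
  | nil => simp [pvSplit1]
  | cons c r =>
    simp only [pvSplit1]
    split_ifs
    · simp
    · cases h : pvSplit1 r <;> simp

theorem pvLength_split1 (cs : List Char) : (pvSplit1 cs).length = cs.count '/' + 1 := by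
  induction cs with
  | nil => simp [pvSplit1]
  | cons c r ih =>
    simp only [pvSplit1]
    by_cases hc : c = '/'
    · simp [hc, ih]
    · rw [if_neg hc]
      cases h : pvSplit1 r with
      | nil => exact absurd h (pvSplit1_ne_nil r)
      | cons p ps =>
        simp only [List.length_cons, List.count_cons]
        rw [h] at ih
        simp only [List.length_cons] at ih
        simp [hc, ih]

theorem pvSplit1_of_count_zero (cs : List Char) (h : cs.count '/' = 0) : pvSplit1 cs = [cs] := by
  induction cs with
  | nil => simp [pvSplit1]
  | cons c r ih =>
    simp only [List.count_cons] at h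
    have hc : c ≠ '/' := by intro hc; simp [hc] at h
    have hr : r.count '/' = 0 := by omega
    simp [pvSplit1, hc, ih hr]

theorem pvGetLast!_cons {α : Type} [Inhabited α] (x : α) (xs : List α) (h : xs ≠ []) :
    (x :: xs).getLast! = xs.getLast! := by
  cases xs with
  | nil => exact absurd rfl h
  | cons y ys => simp [List.getLast!, List.getLast_cons]

theorem pvGetLast!_singleton {α : Type} [Inhabited α] (x : α) : ([x] : List α).getLast! = x := by
  simp [List.getLast!]

theorem pvGo_eq (l : List Char) : ∀ (fuel : Nat) (cur : List Char) (acc : List (List Char)),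
    l.length ≤ fuel →
    PySem.Chars.splitOn.go ['/'] fuel l cur acc
      = acc.reverse ++ (pvSplit1 l).modifyHead (cur.reverse ++ ·) := by
  induction l with
  | nil =>
    intro fuel cur acc _
    cases fuel <;> simp [PySem.Chars.splitOn.go, pvSplit1]
  | cons c r ih =>
    intro fuel cur acc hf
    cases fuel with
    | zero => simp at hf
    | succ fuel =>
      rw [PySem.Chars.splitOn.go]
      by_cases hc : c = '/'
      · have hp : List.isPrefixOf ['/'] (c :: r) = true := by simp [List.isPrefixOf, hc]
        rw [if_pos hp]
        rw [show List.drop (['/'] : List Char).length (c :: r) = r from rfl]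
        rw [ih fuel [] (cur.reverse :: acc) (by simpa using Nat.le_of_succ_le_succ hf)]
        simp only [pvSplit1, if_pos hc, List.reverse_cons, List.modifyHead, List.reverse_nil,
          List.nil_append, List.append_assoc, List.singleton_append]
        cases h : pvSplit1 r <;> simp
      · have hp : List.isPrefixOf ['/'] (c :: r) = false := by
          simp only [List.isPrefixOf, Bool.and_true]
          exact beq_eq_false_iff_ne.mpr (fun h => hc h.symm)
        rw [if_neg (by simp [hp])]
        rw [ih fuel (c :: cur) acc (by simpa using Nat.le_of_succ_le_succ hf)]
        simp only [pvSplit1, if_neg hc]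
        cases h : pvSplit1 r with
        | nil => exact absurd h (pvSplit1_ne_nil r)
        | cons p ps => simp [List.modifyHead]

theorem pvSplitOn_eq (cs : List Char) : PySem.Chars.splitOn cs ['/'] = pvSplit1 cs := by
  rw [PySem.Chars.splitOn, pvGo_eq cs (cs.length + 1) [] [] (by omega)]
  cases h : pvSplit1 cs with
  | nil => exact absurd h (pvSplit1_ne_nil cs)
  | cons p ps => simp [List.modifyHead]

theorem pvFoldl_eq (cs : List Char) : ∀ (n : Int) (f l : List Char), 0 ≤ n →
    cs.foldl pvAltStep (n, f, l)
      = (n + cs.count '/',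
         (if n = 0 then f ++ (pvSplit1 cs).head! else f),
         (if cs.count '/' = 0 then (if n = 0 then l else l ++ cs) else (pvSplit1 cs).getLast!)) := by
  induction cs with
  | nil => intro n f l _; simp [pvSplit1]
  | cons c r ih =>
    intro n f l hn0
    simp only [List.foldl_cons]
    by_cases hc : c = '/'
    · subst hc
      rw [show pvAltStep (n, f, l) '/' = (n + 1, f, []) by simp [pvAltStep]]
      rw [ih _ _ _ (by omega)]
      have hsp : pvSplit1 ('/' :: r) = [] :: pvSplit1 r := by simp [pvSplit1]
      have hcnt : List.count '/' ('/' :: r) = r.count '/' + 1 := by simp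
      rw [hsp, hcnt]
      have hn1 : ¬ (n + 1 = 0) := by omega
      refine Prod.ext (by push_cast; ring) (Prod.ext ?_ ?_)
      · simp only [if_neg hn1, List.head!]
        by_cases hn : n = 0 <;> simp [hn]
      · simp only [if_neg hn1, if_neg (by omega : ¬ r.count '/' + 1 = 0)]
        rw [pvGetLast!_cons _ _ (pvSplit1_ne_nil r)]
        by_cases h0 : r.count '/' = 0
        · simp [h0, pvSplit1_of_count_zero r h0]
        · simp [h0]
    · cases h : pvSplit1 r with
      | nil => exact absurd h (pvSplit1_ne_nil r)
      | cons p ps =>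
        have hlen := pvLength_split1 r
        rw [h] at hlen
        simp only [List.length_cons] at hlen
        have hsp : pvSplit1 (c :: r) = (c :: p) :: ps := by simp [pvSplit1, hc, h]
        have hcnt : List.count '/' (c :: r) = r.count '/' := by
          simp [hc]
        rw [show pvAltStep (n, f, l) c
            = (if n = 0 then (n, f ++ [c], l) else (n, f, l ++ [c])) by
          by_cases hn : n = 0 <;> simp [pvAltStep, hc, hn]]
        by_cases hn : n = 0
        · rw [if_pos hn, ih _ _ _ (by omega), hsp, hcnt, h]
          refine Prod.ext rfl (Prod.ext ?_ ?_)
          · simp [hn, List.head!]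
          · by_cases hps : ps = []
            · subst hps
              have hcnt0 : r.count '/' = 0 := by simp at hlen; omega
              simp [hn, hcnt0]
            · have hcnt0 : r.count '/' ≠ 0 := by
                intro h0
                exact hps (List.eq_nil_of_length_eq_zero (by omega))
              rw [pvGetLast!_cons _ _ hps, pvGetLast!_cons _ _ hps]
              simp [hcnt0]
        · rw [if_neg hn, ih _ _ _ (by omega), hsp, hcnt, h]
          refine Prod.ext rfl (Prod.ext (by simp [hn]) ?_)
          by_cases hps : ps = []
          · subst hps
            have hcnt0 : r.count '/' = 0 := by simp at hlen; omega
            simp [hn, hcnt0]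
          · have hcnt0 : r.count '/' ≠ 0 := by
              intro h0
              exact hps (List.eq_nil_of_length_eq_zero (by omega))
            rw [pvGetLast!_cons _ _ hps, pvGetLast!_cons _ _ hps]
            simp [hcnt0]

-- ===== VERDICT (by name: the statement is the Claim_ definition above) =====
set_option maxHeartbeats 1000000 in
theorem extract_mainboard_id_from_topic_spec : Claim_equal_extract_mainboard_id_from_topic := by
  intro topic _
  unfold Spec_extract_mainboard_id_from_topic
  unfold extract_mainboard_id_from_topic extract_mainboard_id_from_topic_alt
  by_cases htop : topic = ""
  · simp [htop]
  · rw [if_neg htop, if_neg htop]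
    set cs := (PySem.Str.strip topic).toList with hcs
    have hsplit : PySem.Str.split? (PySem.Str.strip topic) "/"
        = some ((pvSplit1 cs).map String.ofList) := by
      rw [PySem.Str.split?]
      rw [show ("/" : String).toList = ['/'] from rfl, ← hcs]
      simp [PySem.Chars.split?, pvSplitOn_eq]
    rw [hsplit, pvFoldl_eq cs 0 [] [] le_rfl]
    by_cases hcnt : cs.count '/' = 2
    · obtain ⟨a, b, c, habc⟩ : ∃ a b c, pvSplit1 cs = [a, b, c] := by
        have hl := pvLength_split1 cs
        rw [hcnt] at hl
        match h : pvSplit1 cs with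
        | [a, b, c] => exact ⟨a, b, c, rfl⟩
        | [] | [_] | [_, _] | _ :: _ :: _ :: _ :: _ => rw [h] at hl; simp at hl
      rw [habc, hcnt]
      have hgl : ([a, b, c] : List (List Char)).getLast! = c := by
        rw [pvGetLast!_cons _ _ (by simp), pvGetLast!_cons _ _ (by simp), pvGetLast!_singleton]
      rw [hgl]
      simp only [List.map_cons, List.map_nil, List.length_cons, List.length_nil, List.head!]
      have e0 : PySem.List.pyGetD [String.ofList a, String.ofList b, String.ofList c] 0 ""
          = String.ofList a := by simp [PySem.List.pyGetD]
      have e2 : PySem.List.pyGetD [String.ofList a, String.ofList b, String.ofList c] 2 ""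
          = String.ofList c := by simp [PySem.List.pyGetD]
      rw [e0, e2]
      by_cases h1 : String.ofList a = "sdcp"
      · simp [h1]
      · simp [h1]
    · have hlen : ((pvSplit1 cs).map String.ofList).length ≠ 3 := by
        rw [List.length_map, pvLength_split1]; omega
      have hB : (0 : Int) + (cs.count '/' : Int) ≠ 2 := by omega
      simp only []
      rw [if_pos (Or.inl hlen), if_pos (Or.inl hB)]
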